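-- pv_equiv track=rewrite | github.com/UncleNon/retro | tools/data/build_resources.py | infer_uniform_enum
-- ===== SOURCE A (Python) =====
-- from typing import Any
--
-- class ValidationError(RuntimeError):
--     pass
--
-- def validate_enum(value: str, allowed: set[str], label: str) -> str:
--     normalized = value.strip()
--     if normalized not in allowed:
--         raise ValidationError(f"{label}: invalid value '{value}', allowed={sorted(allowed)}")
--     return normalized
--
-- def infer_uniform_enum(
--     entries: list[dict[str, Any]],
--     key: str,
--     allowed: set[str],
--     default: str,
--     label: str,
-- ) -> str:
--     values = {str(entry[key]).strip() for entry in entries if str(entry[key]).strip()}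
--     if not values:
--         return default
--     if len(values) == 1:
--         return validate_enum(values.pop(), allowed, label)
--     return default
-- ===== SOURCE B (Python) =====
-- from typing import Any
--
--
-- class ValidationError(RuntimeError):
--     pass
--
--
-- def validate_enum(value: str, allowed: set[str], label: str) -> str:
--     normalized = value.strip()
--     if normalized not in allowed:
--         raise ValidationError(f"{label}: invalid value '{value}', allowed={sorted(allowed)}")
--     return normalized
--
--
-- def infer_uniform_enum(
--     entries: list[dict[str, Any]],
--     key: str,
--     allowed: set[str],
--     default: str,
--     label: str,
-- ) -> str:
--     candidate = None
--     multiple = False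
--     for entry in entries:  # no early exit: every entry[key] is evaluated, as in the comprehension
--         s = str(entry[key]).strip()
--         if not s:
--             continue
--         if candidate is None:
--             candidate = s
--         elif s != candidate:
--             multiple = True
--     if candidate is None or multiple:
--         return default
--     return validate_enum(candidate, allowed, label)
-- ===== Notes on version B (the rewrite author's own statement) =====
-- stated objective: simpler
-- what changed: Replaces the distinct-value set comprehension plus len/pop inspection with one pass keeping only a scalar first-candidate and a 'multiple' flag, so no set is built at all.
import Mathlib
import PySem

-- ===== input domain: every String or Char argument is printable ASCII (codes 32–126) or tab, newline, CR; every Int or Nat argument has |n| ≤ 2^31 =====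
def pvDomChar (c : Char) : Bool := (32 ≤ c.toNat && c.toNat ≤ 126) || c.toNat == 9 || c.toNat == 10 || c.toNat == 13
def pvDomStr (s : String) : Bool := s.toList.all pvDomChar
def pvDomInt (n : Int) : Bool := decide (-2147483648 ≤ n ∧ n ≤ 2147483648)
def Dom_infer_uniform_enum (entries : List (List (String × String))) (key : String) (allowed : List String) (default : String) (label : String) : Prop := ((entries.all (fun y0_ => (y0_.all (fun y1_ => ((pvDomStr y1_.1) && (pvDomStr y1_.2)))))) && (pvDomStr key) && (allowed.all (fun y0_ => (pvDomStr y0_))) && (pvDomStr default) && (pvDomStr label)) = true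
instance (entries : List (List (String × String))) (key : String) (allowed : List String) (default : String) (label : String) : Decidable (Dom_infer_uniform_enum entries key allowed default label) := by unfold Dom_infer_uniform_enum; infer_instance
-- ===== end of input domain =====

-- B replaces A's distinct-value set with a scalar candidate plus a 'multiple' flag (simpler, O(1) extra space);
-- return values are proved equal on Pre_ (A raises KeyError / ValidationError outside Pre_).

-- shared module helpers: str(entry[key]).strip() and validate_enum (both Pythons call the same validate_enum)
def pvVal (key : String) (e : List (String × String)) : String :=
  PySem.Str.strip (((PySem.Dict.ofList e).get? key).getD "")   -- getD "": entry[key] raises KeyError when missing, excluded by Pre_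

def pvValidateEnum (value : String) (allowed : List String) (label : String) : String :=
  let normalized := PySem.Str.strip value
  if allowed.contains normalized then normalized
  else normalized   -- Python raises ValidationError here; excluded by Pre_

-- ===== PORT A =====
def infer_uniform_enum (entries : List (List (String × String))) (key : String) (allowed : List String) (default : String) (label : String) : String :=
  let values : PySem.Set String :=
    entries.foldl (fun s e =>
      let v := pvVal key e
      if v = "" then s else PySem.Set.add s v) PySem.Set.empty
  if values.length = 0 then default
  else if values.length = 1 then pvValidateEnum (values.headD "") allowed label   -- values.pop() of a 1-element set
  else default

-- ===== PORT B =====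
def infer_uniform_enum_alt (entries : List (List (String × String))) (key : String) (allowed : List String) (default : String) (label : String) : String :=
  let st : Option String × Bool :=
    entries.foldl (fun st e =>
      let s := pvVal key e
      if s = "" then st
      else match st.1 with
        | none => (some s, st.2)
        | some c => if s ≠ c then (st.1, true) else st) (none, false)
  match st with
  | (none, _) => default
  | (some c, m) => if m then default else pvValidateEnum c allowed label

-- ===== PRECONDITION & SPEC =====
-- Pre_ excludes exactly the inputs on which the Python A raises: an entry missing `key` (KeyError) and the
-- case where the unique non-empty stripped value is not in `allowed` (ValidationError).
def Pre_infer_uniform_enum (entries : List (List (String × String))) (key : String) (allowed : List String) (default : String) (label : String) : Prop :=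
  (∀ e ∈ entries, ((PySem.Dict.ofList e).get? key).isSome) ∧
  (∀ v ∈ entries.map (pvVal key), v ≠ "" →
    (∃ u ∈ entries.map (pvVal key), u ≠ "" ∧ u ≠ v) ∨ allowed.contains v)
instance (entries : List (List (String × String))) (key : String) (allowed : List String) (default : String) (label : String) : Decidable (Pre_infer_uniform_enum entries key allowed default label) := by unfold Pre_infer_uniform_enum; infer_instance

def pvWitness_infer_uniform_enum : (List (List (String × String))) × String × List String × String × String :=
  ([[("k", "a")], [("k", " a ")], [("k", "  ")]], "k", ["a", "b"], "d", "L")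

def Spec_infer_uniform_enum (entries : List (List (String × String))) (key : String) (allowed : List String) (default : String) (label : String) (out : String) : Prop := out = infer_uniform_enum_alt entries key allowed default label
instance (entries : List (List (String × String))) (key : String) (allowed : List String) (default : String) (label : String) (out : String) : Decidable (Spec_infer_uniform_enum entries key allowed default label out) := by unfold Spec_infer_uniform_enum; infer_instance

-- ===== CLAIM (what is proved, stated in full; the proofs are below) =====
def Claim_equal_infer_uniform_enum : Prop := ∀ (entries : List (List (String × String))) (key : String) (allowed : List String) (default : String) (label : String), Dom_infer_uniform_enum entries key allowed default label → Pre_infer_uniform_enum entries key allowed default label → Spec_infer_uniform_enum entries key allowed default label (infer_uniform_enum entries key allowed default label)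

-- ===== LEMMAS AND PROOFS =====

-- B's loop state mirrors A's set: candidate = first element of the set, multiple = (set has ≥ 2 elements).
theorem pv_inv (key : String) (l : List (List (String × String))) :
    ∀ (s0 : PySem.Set String), s0.Nodup →
    l.foldl (fun st e =>
      let s := pvVal key e
      if s = "" then st
      else match st.1 with
        | none => (some s, st.2)
        | some c => if s ≠ c then (st.1, true) else st) (s0.head?, decide (2 ≤ s0.length))
    = (let sf := l.foldl (fun s e =>
         let v := pvVal key e
         if v = "" then s else PySem.Set.add s v) s0
       (sf.head?, decide (2 ≤ sf.length))) := by
  induction l with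
  | nil => intro s0 _; rfl
  | cons e rest ih =>
    intro s0 hnd
    simp only [List.foldl]
    by_cases hv : pvVal key e = ""
    · simp only [hv, if_pos rfl]
      exact ih s0 hnd
    · simp only [if_neg hv]
      have hstep :
          (match s0.head? with
            | none => (some (pvVal key e), decide (2 ≤ s0.length))
            | some c => if pvVal key e ≠ c then (s0.head?, true) else (s0.head?, decide (2 ≤ s0.length)))
          = ((PySem.Set.add s0 (pvVal key e)).head?, decide (2 ≤ (PySem.Set.add s0 (pvVal key e)).length)) := by
        cases s0 with
        | nil => simp [PySem.Set.add, PySem.Set.contains]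
        | cons a t =>
          simp only [List.head?]
          by_cases hmem : pvVal key e ∈ (a :: t)
          · have hadd : PySem.Set.add (a :: t) (pvVal key e) = (a :: t) := by
              simp [PySem.Set.add, hmem]
            rw [hadd]
            by_cases heq : pvVal key e = a
            · simp [heq]
            · -- the value was seen before and differs from the head, so the set already has ≥ 2 elements
              have : pvVal key e ∈ t := by
                rcases List.mem_cons.mp hmem with h | h
                · exact absurd h heq
                · exact h
              have h1 : 0 < t.length := List.length_pos_of_mem this
              have h2 : 2 ≤ (a :: t).length := by simp; omega
              simp [heq]; omega
          · have hadd : PySem.Set.add (a :: t) (pvVal key e) = (a :: t) ++ [pvVal key e] := by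
              simp [PySem.Set.add, hmem]
            have hne : pvVal key e ≠ a := fun h => hmem (h ▸ List.mem_cons_self ..)
            simp [hadd, hne]
      rw [hstep]
      exact ih (PySem.Set.add s0 (pvVal key e)) (PySem.Set.nodup_add _ _ hnd)

-- ===== VERDICT (by name: the statement is the Claim_ definition above) =====
theorem infer_uniform_enum_spec : Claim_equal_infer_uniform_enum := by
  intro entries key allowed default label _ _
  unfold Spec_infer_uniform_enum infer_uniform_enum infer_uniform_enum_alt
  have hinv := pv_inv key entries PySem.Set.empty (by simp [PySem.Set.empty])
  have hstart : ((PySem.Set.empty : PySem.Set String).head?, decide (2 ≤ (PySem.Set.empty : PySem.Set String).length)) = ((none : Option String), false) := by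
    simp [PySem.Set.empty]
  rw [hstart] at hinv
  simp only []
  rw [hinv]
  cases hS : entries.foldl (fun s e =>
      let v := pvVal key e
      if v = "" then s else PySem.Set.add s v) PySem.Set.empty with
  | nil => simp [List.head?]
  | cons a t =>
    cases t with
    | nil => simp [List.head?, List.headD]
    | cons b u => simp [List.head?]
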